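-- pv_equiv track=rewrite | github.com/tianhm/myfunc | myfunction.py | LLV
-- ===== SOURCE A (Python) =====
-- def LLV(slist, n):
--     """
--     Lowest value over a specified period
--     """
--     min_list = []
--     i = 0
--     while i < len(slist):
--         if i + 1 < n:
--             MIN = min(slist[0:i+1])
--         else:
--             start = i + 1 - n
--             end = i + 1
--             MIN = min(slist[start:end])
--         min_list.append(MIN)
--         i += 1
--     return min_list
-- ===== SOURCE B (Python) =====
-- def LLV(slist, n):
--     """
--     Lowest value over a specified period
--     """
--     res = []
--     m = 0   # current window minimum (valid only while j is inside the window)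
--     j = -1  # last index achieving the minimum; -1 = nothing cached yet
--     for i, x in enumerate(slist):
--         start = max(0, i - n + 1)
--         if j < start:
--             # cached minimum left the window: rescan the window once
--             m = slist[start]
--             j = start
--             for k in range(start + 1, i + 1):
--                 if slist[k] <= m:
--                     m = slist[k]
--                     j = k
--         elif x <= m:
--             m = x
--             j = i
--         res.append(m)
--     return res
-- ===== Notes on version B (the rewrite author's own statement) =====
-- stated objective: alternative
-- what changed: A recomputes min() over a fresh window slice at every index (O(n) each); B keeps the current minimum together with the last index achieving it, updates it in O(1) per step, and rescans the window only when that index slides out of the window.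
import Mathlib
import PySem

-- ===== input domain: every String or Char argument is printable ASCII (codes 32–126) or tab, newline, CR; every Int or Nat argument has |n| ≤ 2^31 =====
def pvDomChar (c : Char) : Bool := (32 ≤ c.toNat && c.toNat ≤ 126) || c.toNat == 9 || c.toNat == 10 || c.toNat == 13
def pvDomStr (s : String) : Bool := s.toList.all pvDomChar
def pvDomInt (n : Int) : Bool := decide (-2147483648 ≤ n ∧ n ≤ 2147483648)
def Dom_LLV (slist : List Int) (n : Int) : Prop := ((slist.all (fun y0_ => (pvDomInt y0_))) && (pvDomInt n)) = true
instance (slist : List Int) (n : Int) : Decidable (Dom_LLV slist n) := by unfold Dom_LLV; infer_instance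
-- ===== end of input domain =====

-- B replaces A's per-index full-window min scan by a cached minimum with its last index,
-- rescanning the window only when the cached minimum expires (objective: alternative).


-- ===== PORT A =====
-- while i < len(slist): MIN = min(prefix slice or window slice); min_list.append(MIN)
def LLVgoA (slist : List Int) (n : Int) : Nat → Nat → List Int → List Int
  | 0, _, acc => acc
  | fuel + 1, i, acc =>
    if i < slist.length then
      LLVgoA slist n fuel (i + 1) (acc ++
        [if (i : Int) + 1 < n then
          (PySem.List.min? (PySem.List.slice slist (some 0) (some ((i : Int) + 1))) (fun x => x)).getD 0
        else
          (PySem.List.min? (PySem.List.slice slist (some ((i : Int) + 1 - n)) (some ((i : Int) + 1))) (fun x => x)).getD 0])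
    else acc

def LLV (slist : List Int) (n : Int) : List Int := LLVgoA slist n slist.length 0 []

-- ===== PORT B =====
-- start = max(0, i - n + 1)
def bstart (n : Int) (i : Nat) : Int := max 0 ((i : Int) - n + 1)

-- inner rescan: for k in range(start+1, i+1): if slist[k] <= m: m, j = slist[k], k
def LLVscan (slist : List Int) (i : Nat) : Nat → Nat → Int → Int → Int × Int
  | 0, _, m, j => (m, j)
  | fuel + 1, k, m, j =>
    if k < i + 1 then
      if PySem.List.pyGetD slist (k : Int) 0 ≤ m then
        LLVscan slist i fuel (k + 1) (PySem.List.pyGetD slist (k : Int) 0) (k : Int)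
      else
        LLVscan slist i fuel (k + 1) m j
    else (m, j)

-- m = slist[start]; j = start; then the rescan loop
def brescan (slist : List Int) (n : Int) (i : Nat) : Int × Int :=
  LLVscan slist i (i + 1) ((bstart n i).toNat + 1) (PySem.List.pyGetD slist (bstart n i) 0) (bstart n i)

-- outer loop: cached minimum m at its last index j; rescan only when j leaves the window
def LLVgoB (slist : List Int) (n : Int) : Nat → Nat → Int → Int → List Int → List Int
  | 0, _, _, _, res => res
  | fuel + 1, i, m, j, res =>
    if i < slist.length then
      if j < bstart n i then
        LLVgoB slist n fuel (i + 1) (brescan slist n i).1 (brescan slist n i).2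
          (res ++ [(brescan slist n i).1])
      else if PySem.List.pyGetD slist (i : Int) 0 ≤ m then
        LLVgoB slist n fuel (i + 1) (PySem.List.pyGetD slist (i : Int) 0) (i : Int)
          (res ++ [PySem.List.pyGetD slist (i : Int) 0])
      else
        LLVgoB slist n fuel (i + 1) m j (res ++ [m])
    else res

def LLV_alt (slist : List Int) (n : Int) : List Int :=
  LLVgoB slist n slist.length 0 0 (-1) []

-- ===== PRECONDITION & SPEC =====
-- Pre_ excludes n ≤ 0 with a nonempty slist, where A raises ValueError (min() of an empty slice).
def Pre_LLV (slist : List Int) (n : Int) : Prop := slist = [] ∨ 1 ≤ n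
instance (slist : List Int) (n : Int) : Decidable (Pre_LLV slist n) := by unfold Pre_LLV; infer_instance
def pvWitness_LLV : List Int × Int := ([3, 1, 4, 1, 5], 2)

def Spec_LLV (slist : List Int) (n : Int) (out : List Int) : Prop := out = LLV_alt slist n
instance (slist : List Int) (n : Int) (out : List Int) : Decidable (Spec_LLV slist n out) := by unfold Spec_LLV; infer_instance

-- ===== CLAIM (what is proved, stated in full; the proofs are below) =====
def Claim_equal_LLV : Prop := ∀ (slist : List Int) (n : Int), Dom_LLV slist n → Pre_LLV slist n → Spec_LLV slist n (LLV slist n)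

-- ===== LEMMAS AND PROOFS =====

-- element at index k, total form
def elemAt (slist : List Int) (k : Nat) : Int := slist.getD k 0
-- window start as a Nat
def sN (n : Int) (i : Nat) : Nat := (bstart n i).toNat
-- the window slist[start : i+1]
def win (slist : List Int) (n : Int) (i : Nat) : List Int :=
  (slist.take (i + 1)).drop (sN n i)
-- the value both programs emit at step i
def wmin (slist : List Int) (n : Int) (i : Nat) : Int :=
  (PySem.List.min? (win slist n i) (fun x => x)).getD 0
-- the remaining output stream from step i
def outFrom (slist : List Int) (n : Int) (i fuel : Nat) : List Int :=
  match fuel with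
  | 0 => []
  | f + 1 => wmin slist n i :: outFrom slist n (i + 1) f

theorem min_getD_eq {W : List Int} {m : Int} (hm : m ∈ W) (hmin : ∀ y ∈ W, m ≤ y) :
    (PySem.List.min? W (fun x => x)).getD 0 = m := by
  cases hW : PySem.List.min? W (fun x => x) with
  | none =>
      have hnil := (PySem.List.min?_eq_none_iff W (fun x : Int => x)).mp hW
      subst hnil; cases hm
  | some v =>
      have h1 : v ≤ m := PySem.List.min?_isMin hW m hm
      have h2 : m ≤ v := hmin v (PySem.List.min?_mem hW)
      simpa using le_antisymm h1 h2

theorem sN_le (n : Int) (i : Nat) (hn : 1 ≤ n) : sN n i ≤ i := by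
  unfold sN bstart; omega

theorem sN_mono (n : Int) (i : Nat) : sN n i ≤ sN n (i + 1) := by
  unfold sN bstart; omega

theorem bstart_cast (n : Int) (i : Nat) : bstart n i = ((sN n i : Nat) : Int) := by
  unfold sN bstart; omega

theorem length_win (slist : List Int) (n : Int) (i : Nat) (hi : i < slist.length) :
    (win slist n i).length = i + 1 - sN n i := by
  simp [win]; omega

theorem getElem_win (slist : List Int) (n : Int) (i : Nat) (hi : i < slist.length)
    (t : Nat) (ht : t < (win slist n i).length) :
    (win slist n i)[t] = elemAt slist (sN n i + t) := by
  have hl := length_win slist n i hi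
  unfold win at ht ⊢
  rw [List.getElem_drop, List.getElem_take]
  unfold elemAt
  rw [List.getD_eq_getElem]

theorem mem_win_iff (slist : List Int) (n : Int) (i : Nat) (hi : i < slist.length) (y : Int) :
    y ∈ win slist n i ↔ ∃ k : Nat, sN n i ≤ k ∧ k ≤ i ∧ elemAt slist k = y := by
  have hl := length_win slist n i hi
  rw [List.mem_iff_getElem]
  constructor
  · rintro ⟨t, ht, rfl⟩
    exact ⟨sN n i + t, by omega, by omega, (getElem_win slist n i hi t ht).symm⟩
  · rintro ⟨k, h1, h2, rfl⟩
    refine ⟨k - sN n i, by omega, ?_⟩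
    rw [getElem_win slist n i hi _ (by omega)]
    congr 1; omega

theorem wmin_eq (slist : List Int) (n : Int) (i : Nat) (m : Int)
    (hi : i < slist.length) (jn : Nat)
    (hj1 : sN n i ≤ jn) (hj2 : jn ≤ i) (hjm : elemAt slist jn = m)
    (hmin : ∀ k : Nat, sN n i ≤ k → k ≤ i → m ≤ elemAt slist k) :
    wmin slist n i = m := by
  apply min_getD_eq
  · exact (mem_win_iff slist n i hi m).mpr ⟨jn, hj1, hj2, hjm⟩
  · intro y hy
    obtain ⟨k, h1, h2, rfl⟩ := (mem_win_iff slist n i hi y).mp hy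
    exact hmin k h1 h2

-- invariant of the inner rescan loop: m is the minimum of slist[s:K], j its last index
def PInv (slist : List Int) (s K : Nat) (m j : Int) : Prop :=
  (s : Int) ≤ j ∧ j < (K : Int) ∧ elemAt slist j.toNat = m ∧
  (∀ k : Nat, s ≤ k → k < K → m ≤ elemAt slist k) ∧
  (∀ k : Nat, j < (k : Int) → k < K → m < elemAt slist k)

theorem scan_spec (slist : List Int) (i s : Nat) :
    ∀ fuel K m j, i + 1 - K ≤ fuel → K ≤ i + 1 → PInv slist s K m j →
      PInv slist s (i + 1) (LLVscan slist i fuel K m j).1 (LLVscan slist i fuel K m j).2 := by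
  intro fuel
  induction fuel with
  | zero =>
      intro K m j hd hK hP
      have : K = i + 1 := by omega
      subst this; exact hP
  | succ fuel ih =>
      intro K m j hd hK hP
      by_cases hKlt : K < i + 1
      case neg =>
        rw [LLVscan, if_neg hKlt]
        have : K = i + 1 := by omega
        subst this; exact hP
      case pos =>
      obtain ⟨hp1, hp2, hp3, hp4, hp5⟩ := hP
      have hx : PySem.List.pyGetD slist (K : Int) 0 = elemAt slist K := by
        simp [elemAt]
      rw [LLVscan, if_pos hKlt]
      split
      case isTrue h =>
        apply ih (K + 1) _ _ (by omega) (by omega)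
        rw [hx] at h ⊢
        refine ⟨by omega, by push_cast; omega, by simp, ?_, ?_⟩
        · intro k hk1 hk2
          rcases Nat.lt_or_ge k K with hlt | hge
          · exact le_trans h (hp4 k hk1 hlt)
          · have : k = K := by omega
            subst this; exact le_refl _
        · intro k hk1 hk2
          have hKk : K < k := by exact_mod_cast hk1
          exact absurd hk2 (by omega)
      case isFalse h =>
        apply ih (K + 1) _ _ (by omega) (by omega)
        rw [hx] at h
        refine ⟨hp1, by push_cast; omega, hp3, ?_, ?_⟩
        · intro k hk1 hk2
          rcases Nat.lt_or_ge k K with hlt | hge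
          · exact hp4 k hk1 hlt
          · have : k = K := by omega
            subst this; omega
        · intro k hk1 hk2
          rcases Nat.lt_or_ge k K with hlt | hge
          · exact hp5 k hk1 hlt
          · have : k = K := by omega
            subst this; omega

-- invariant carried by B's outer loop into step i: if the cached index j is still
-- inside the window, then m = slist[j] is the window-so-far minimum and j its last index
def EInv (slist : List Int) (n : Int) (i : Nat) (m j : Int) : Prop :=
  bstart n i ≤ j →
    j < (i : Int) ∧ elemAt slist j.toNat = m ∧
    (∀ k : Nat, bstart n i ≤ (k : Int) → k < i → m ≤ elemAt slist k) ∧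
    (∀ k : Nat, j < (k : Int) → k < i → m < elemAt slist k)

theorem bstart_nonneg (n : Int) (i : Nat) : 0 ≤ bstart n i := le_max_left _ _

theorem goB_eq (slist : List Int) (n : Int) (hn : 1 ≤ n) :
    ∀ fuel i m j res, slist.length - i ≤ fuel → EInv slist n i m j →
      LLVgoB slist n fuel i m j res = res ++ outFrom slist n i (slist.length - i) := by
  intro fuel
  induction fuel with
  | zero =>
      intro i m j res hd hE
      have : slist.length - i = 0 := by omega
      rw [this]; simp [outFrom, LLVgoB]
  | succ fuel ih =>
      intro i m j res hd hE
      by_cases hi : i < slist.length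
      case neg =>
        have : slist.length - i = 0 := by omega
        rw [this, LLVgoB, if_neg hi]; simp [outFrom]
      case pos =>
      have hsle : sN n i ≤ i := sN_le n i hn
      have hlen : slist.length - i = (slist.length - (i + 1)) + 1 := by omega
      rw [LLVgoB, if_pos hi, hlen]
      simp only [outFrom]
      have hx : PySem.List.pyGetD slist ((i : Nat) : Int) 0 = elemAt slist i := by
        simp [elemAt]
      split
      case isTrue hb =>
        -- rescan: the cached minimum expired
        have hP0 : PInv slist (sN n i) (sN n i + 1)
            (PySem.List.pyGetD slist (bstart n i) 0) (bstart n i) := by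
          rw [bstart_cast]
          refine ⟨by omega, by push_cast; omega, by simp [elemAt], ?_, ?_⟩
          · intro k hk1 hk2
            have : k = sN n i := by omega
            subst this; simp [elemAt]
          · intro k hk1 hk2
            have : sN n i < k := by exact_mod_cast hk1
            omega
        have hP := scan_spec slist i (sN n i) (i + 1) (sN n i + 1) _ _
          (by omega) (by omega) hP0
        rw [show brescan slist n i = LLVscan slist i (i + 1) (sN n i + 1)
              (PySem.List.pyGetD slist (bstart n i) 0) (bstart n i) from rfl]
        set p := LLVscan slist i (i + 1) (sN n i + 1) (PySem.List.pyGetD slist (bstart n i) 0) (bstart n i)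
          with hpdef
        obtain ⟨hq1, hq2, hq3, hq4, hq5⟩ := hP
        have hw : wmin slist n i = p.1 := by
          apply wmin_eq slist n i p.1 hi p.2.toNat
          · omega
          · omega
          · exact hq3
          · intro k hk1 hk2; exact hq4 k hk1 (by omega)
        have hE' : EInv slist n (i + 1) p.1 p.2 := by
          intro _
          refine ⟨by push_cast; omega, hq3, ?_, ?_⟩
          · intro k hk1 hk2
            have : sN n i ≤ k := by
              have := sN_mono n i
              rw [bstart_cast] at hk1
              omega
            exact hq4 k this (by omega)
          · intro k hk1 hk2; exact hq5 k hk1 (by omega)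
        rw [ih (i + 1) p.1 p.2 _ (by omega) hE', hw]
        simp
      case isFalse hb =>
        have hble : bstart n i ≤ j := by omega
        obtain ⟨he1, he2, he3, he4⟩ := hE hble
        have hj0 : 0 ≤ j := le_trans (bstart_nonneg n i) hble
        have hbj : sN n i ≤ j.toNat := by
          have := bstart_cast n i; omega
        split
        case isTrue hc =>
          -- new element is a (weak) new minimum
          rw [hx] at hc ⊢
          have hw : wmin slist n i = elemAt slist i := by
            apply wmin_eq slist n i (elemAt slist i) hi i hsle (le_refl i) rfl
            intro k hk1 hk2
            rcases Nat.lt_or_ge k i with hlt | hge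
            · refine le_trans hc (he3 k ?_ hlt)
              rw [bstart_cast]; exact_mod_cast hk1
            · have : k = i := by omega
              subst this; exact le_refl _
          have hE' : EInv slist n (i + 1) (elemAt slist i) ((i : Nat) : Int) := by
            intro _
            refine ⟨by push_cast; omega, by simp, ?_, ?_⟩
            · intro k hk1 hk2
              rcases Nat.lt_or_ge k i with hlt | hge
              · refine le_trans hc (he3 k ?_ hlt)
                have hm := sN_mono n i
                rw [bstart_cast] at hk1 ⊢
                omega
              · have : k = i := by omega
                subst this; exact le_refl _
            · intro k hk1 hk2
              have : i < k := by exact_mod_cast hk1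
              omega
          rw [ih (i + 1) _ _ _ (by omega) hE', hw]
          simp
        case isFalse hc =>
          -- cached minimum still wins
          rw [hx] at hc
          have hclt : m < elemAt slist i := by omega
          have hw : wmin slist n i = m := by
            apply wmin_eq slist n i m hi j.toNat hbj (by omega) he2
            intro k hk1 hk2
            rcases Nat.lt_or_ge k i with hlt | hge
            · refine he3 k ?_ hlt
              rw [bstart_cast]; exact_mod_cast hk1
            · have : k = i := by omega
              subst this; omega
          have hE' : EInv slist n (i + 1) m j := by
            intro h'
            refine ⟨by push_cast; omega, he2, ?_, ?_⟩
            · intro k hk1 hk2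
              rcases Nat.lt_or_ge k i with hlt | hge
              · refine he3 k ?_ hlt
                have hm := sN_mono n i
                rw [bstart_cast] at hk1 ⊢
                omega
              · have : k = i := by omega
                subst this; omega
            · intro k hk1 hk2
              rcases Nat.lt_or_ge k i with hlt | hge
              · exact he4 k hk1 hlt
              · have : k = i := by omega
                subst this; omega
          rw [ih (i + 1) _ _ _ (by omega) hE', hw]
          simp

theorem aMin_eq (slist : List Int) (n : Int) (i : Nat) :
    (if (i : Int) + 1 < n then
      (PySem.List.min? (PySem.List.slice slist (some 0) (some ((i : Int) + 1))) (fun x => x)).getD 0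
    else
      (PySem.List.min? (PySem.List.slice slist (some ((i : Int) + 1 - n)) (some ((i : Int) + 1))) (fun x => x)).getD 0)
    = wmin slist n i := by
  have hcast : ((i : Int) + 1).toNat = i + 1 := by omega
  split
  case isTrue h =>
    have hs : sN n i = 0 := by unfold sN bstart; omega
    unfold wmin win
    rw [hs, PySem.List.slice_toNat, hcast]
    · simp
    · omega
    · omega
  case isFalse h =>
    have hs : sN n i = ((i : Int) + 1 - n).toNat := by unfold sN bstart; omega
    unfold wmin win
    rw [PySem.List.slice_toNat, List.drop_take, hs, hcast]
    · omega
    · omega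

theorem goA_eq (slist : List Int) (n : Int) :
    ∀ fuel i acc, slist.length - i ≤ fuel →
      LLVgoA slist n fuel i acc = acc ++ outFrom slist n i (slist.length - i) := by
  intro fuel
  induction fuel with
  | zero =>
      intro i acc hd
      have : slist.length - i = 0 := by omega
      rw [this]; simp [outFrom, LLVgoA]
  | succ fuel ih =>
      intro i acc hd
      by_cases hi : i < slist.length
      case neg =>
        have : slist.length - i = 0 := by omega
        rw [this, LLVgoA, if_neg hi]; simp [outFrom]
      case pos =>
      have hlen : slist.length - i = (slist.length - (i + 1)) + 1 := by omega
      rw [LLVgoA, if_pos hi, hlen]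
      simp only [outFrom]
      rw [aMin_eq slist n i, ih (i + 1) _ (by omega)]
      simp

theorem LLV_total_eq (slist : List Int) (n : Int) (hn : 1 ≤ n) :
    LLV slist n = LLV_alt slist n := by
  unfold LLV LLV_alt
  have hE0 : EInv slist n 0 0 (-1) := by
    intro h
    exfalso
    have := bstart_nonneg n 0
    omega
  rw [goA_eq slist n slist.length 0 [] (by omega),
      goB_eq slist n hn slist.length 0 0 (-1) [] (by omega) hE0]

-- ===== VERDICT (by name: the statement is the Claim_ definition above) =====
theorem LLV_spec : Claim_equal_LLV := by
  intro slist n _ hpre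
  unfold Spec_LLV
  rcases hpre with h | h
  · subst h; simp [LLV, LLV_alt, LLVgoA, LLVgoB]
  · exact LLV_total_eq slist n h
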